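-- pv_equiv track=rewrite | github.com/nitin35byte/new_prython_practise_repo | Important Coding Questions/hcltech.py | duplicatee
-- ===== SOURCE A (Python) =====
-- def duplicatee(arr):
--     arr="".join(i for i in arr if i.isalnum() )
--     char={}
--     duplicate=[]
--
--     for i in arr:
--         if i in char:
--             char[i]+=1
--         else:
--             char[i]=1
--
--     for char , count in char.items():
--         if count >1:
--             duplicate.append(char)
--
--     return duplicate
-- ===== SOURCE B (Python) =====
-- def duplicatee(arr):
--     filtered = "".join(i for i in arr if i.isalnum())
--     seen = set()
--     duplicate = []
--     for c in filtered:
--         if c not in seen: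
--             seen.add(c)
--             if filtered.count(c) > 1:
--                 duplicate.append(c)
--     return duplicate
-- ===== Notes on version B (the rewrite author's own statement) =====
-- stated objective: simpler
-- what changed: Replaced the build-a-frequency-dict-then-scan-items two-pass with a single pass over the filtered string that keeps a seen set and appends each first-seen character whose count in the filtered string exceeds 1.
import Mathlib
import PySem

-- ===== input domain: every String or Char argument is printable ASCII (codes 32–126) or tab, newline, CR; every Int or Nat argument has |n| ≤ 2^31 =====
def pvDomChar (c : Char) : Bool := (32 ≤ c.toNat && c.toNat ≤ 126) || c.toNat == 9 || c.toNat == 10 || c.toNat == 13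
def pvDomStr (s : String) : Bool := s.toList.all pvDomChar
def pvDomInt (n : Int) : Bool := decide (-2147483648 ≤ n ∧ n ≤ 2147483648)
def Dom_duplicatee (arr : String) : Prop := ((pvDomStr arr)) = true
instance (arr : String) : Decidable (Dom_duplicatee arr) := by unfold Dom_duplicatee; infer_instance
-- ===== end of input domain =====

-- B replaces A's build-frequency-dict-then-scan-items two-pass with a single seen-set pass
-- that appends each first-seen character whose count in the filtered string exceeds 1 (objective: simpler).

-- ===== PORT A =====
def duplicatee (arr : String) : List String :=
  -- arr = "".join(i for i in arr if i.isalnum()); then count, then collect count>1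
  (((arr.toList.filter PySem.Chars.isalnum).foldl
      (fun d i => if d.contains i then d.modify i 0 (· + 1) else d.insert i 1)
      (PySem.Dict.empty : PySem.Dict Char Int)).items).foldl
    (fun acc p => if p.2 > 1 then acc ++ [String.ofList [p.1]] else acc) ([] : List String)

-- ===== PORT B =====
def duplicatee_alt (arr : String) : List String :=
  -- filtered = "".join(i for i in arr if i.isalnum()); one pass with a seen set
  let filtered := arr.toList.filter PySem.Chars.isalnum
  (filtered.foldl
    (fun (st : PySem.Set Char × List String) c =>
      if PySem.Set.contains st.1 c then st
      else (PySem.Set.add st.1 c,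
            if 1 < filtered.count c then st.2 ++ [String.ofList [c]] else st.2))
    ((PySem.Set.empty : PySem.Set Char), ([] : List String))).2

-- ===== PRECONDITION & SPEC =====
def Spec_duplicatee (arr : String) (out : List String) : Prop := out = duplicatee_alt arr
instance (arr : String) (out : List String) : Decidable (Spec_duplicatee arr out) := by unfold Spec_duplicatee; infer_instance

-- ===== CLAIM (what is proved, stated in full; the proofs are below) =====
def Claim_equal_duplicatee : Prop := ∀ (arr : String), Dom_duplicatee arr → Spec_duplicatee arr (duplicatee arr)

-- ===== LEMMAS AND PROOFS =====

-- A's counting loop body (insert-1-or-increment) is precisely Counter's step.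
lemma duplicatee_count_loop (cs : List Char) :
    cs.foldl (fun d i => if d.contains i then d.modify i 0 (· + 1) else d.insert i 1)
      (PySem.Dict.empty : PySem.Dict Char Int) = PySem.Dict.counter cs := by
  rw [PySem.Dict.counter_eq_foldl]
  have hstep : (fun (d : PySem.Dict Char Int) i =>
      if d.contains i then d.modify i 0 (· + 1) else d.insert i 1)
      = fun d x => d.modify x 0 (· + 1) := by
    funext d i
    by_cases h : d.contains i = true
    · simp [h]
    · simp only [Bool.not_eq_true] at h
      rw [if_neg (by simp [h])]
      unfold PySem.Dict.modify PySem.Dict.insert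
      simp [h, PySem.Dict.getD_of_not_contains (h := h)]
  rw [hstep]

-- filtering a discard by a predicate false at the discarded element drops the discard
lemma filter_discard_of_false (p : Char → Bool) (t : List Char) (c : Char) (h : p c = false) :
    List.filter p (PySem.Set.discard t c) = List.filter p t := by
  simp only [PySem.Set.discard, List.filter_filter]
  apply List.filter_congr
  intro x _
  by_cases hxc : x = c
  · subst hxc; simp [h]
  · simp [hxc]

-- B's loop, fully generalized over the accumulators
lemma duplicatee_alt_loop (full : List Char) (cs : List Char) :
    ∀ (s : PySem.Set Char) (d : List String),
    (cs.foldl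
      (fun (st : PySem.Set Char × List String) c =>
        if PySem.Set.contains st.1 c then st
        else (PySem.Set.add st.1 c,
              if 1 < full.count c then st.2 ++ [String.ofList [c]] else st.2)) (s, d)).2
    = d ++ (((PySem.Set.ofList cs).filter (fun c => !(PySem.Set.contains s c))).filter
              (fun c => decide (1 < full.count c))).map (fun c => String.ofList [c]) := by
  induction cs with
  | nil => intro s d; simp
  | cons c cs ih =>
    intro s d
    rw [PySem.Set.ofList_cons, List.foldl_cons]
    by_cases hc : PySem.Set.contains s c = true
    · rw [if_pos hc, ih s d,
         List.filter_cons_of_neg (by simpa using (PySem.Set.contains_iff s c).mp hc),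
         filter_discard_of_false _ _ _ (by simp only [hc, Bool.not_true])]
    · simp only [Bool.not_eq_true] at hc
      have hcm : c ∉ s := by
        intro hm
        rw [(PySem.Set.contains_iff s c).mpr hm] at hc
        simp at hc
      rw [if_neg (fun h => hcm ((PySem.Set.contains_iff s c).mp h)), ih,
         List.filter_cons_of_pos (by simp only [hc, Bool.not_false])]
      have hrest : List.filter (fun x => !(PySem.Set.contains (PySem.Set.add s c) x))
            (PySem.Set.ofList cs)
          = List.filter (fun x => !(PySem.Set.contains s x)) ((PySem.Set.ofList cs).discard c) := by
        simp only [PySem.Set.discard, List.filter_filter]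
        apply List.filter_congr
        intro x _
        rw [PySem.Set.add_of_not_mem hcm]
        by_cases hxc : x = c
        · subst hxc; simp [PySem.Set.contains]
        · simp [PySem.Set.contains, hxc]
      rw [hrest]
      by_cases hcount : 1 < full.count c
      · rw [if_pos hcount, List.filter_cons_of_pos (by simp [hcount])]
        simp
      · rw [if_neg hcount, List.filter_cons_of_neg (by simp [hcount])]

-- both programs reduce to: distinct alnum chars of arr with count > 1, in first-occurrence order
lemma duplicatee_eq_closed (arr : String) :
    duplicatee arr
      = ((PySem.Set.ofList (arr.toList.filter PySem.Chars.isalnum)).filter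
          (fun c => decide (1 < (arr.toList.filter PySem.Chars.isalnum).count c))).map
          (fun c => String.ofList [c]) := by
  unfold duplicatee
  rw [duplicatee_count_loop]
  have hbool : (fun (acc : List String) (p : Char × Int) =>
        if p.2 > 1 then acc ++ [String.ofList [p.1]] else acc)
      = fun acc p => if (fun q : Char × Int => decide (q.2 > 1)) p = true
          then acc ++ [(fun q : Char × Int => String.ofList [q.1]) p] else acc := by
    funext acc p
    by_cases h : p.2 > 1 <;> simp [h]
  rw [hbool, PySem.List.foldl_append_if, PySem.Dict.items_counter]
  simp only [List.nil_append, List.filter_map, List.map_map]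
  congr 1
  apply List.filter_congr
  intro x _
  simp only [Function.comp_apply, decide_eq_decide]
  exact_mod_cast Iff.rfl

lemma duplicatee_alt_eq_closed (arr : String) :
    duplicatee_alt arr
      = ((PySem.Set.ofList (arr.toList.filter PySem.Chars.isalnum)).filter
          (fun c => decide (1 < (arr.toList.filter PySem.Chars.isalnum).count c))).map
          (fun c => String.ofList [c]) := by
  unfold duplicatee_alt
  rw [duplicatee_alt_loop]
  simp [PySem.Set.contains]

-- ===== VERDICT (by name: the statement is the Claim_ definition above) =====
theorem duplicatee_spec : Claim_equal_duplicatee := by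
  intro arr _
  unfold Spec_duplicatee
  rw [duplicatee_eq_closed, duplicatee_alt_eq_closed]
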